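-- pv_equiv track=rewrite | github.com/ChibiKev/Leetcode | 1725. Number Of Rectangles That Can Form The Largest Square/solution.py | countGoodRectangles
-- ===== SOURCE A (Python) =====
-- def countGoodRectangles(rectangles):
--   """
--   :type rectangles: List[List[int]]
--   :rtype: int
--   """
--   count = 0
--   maxLen = 0
--   for rectangle in rectangles:
--     minLen = rectangle[0]
--     if minLen > rectangle[1]:
--       minLen = rectangle[1]
--     if minLen > maxLen:
--       maxLen = minLen
--       count = 1
--     elif minLen == maxLen:
--       count += 1
--
--   return count
-- ===== SOURCE B (Python) =====
-- def countGoodRectangles(rectangles):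
--     sides = [min(r[0], r[1]) for r in rectangles]
--     if not sides:
--         return 0
--     m = max(sides)
--     return sides.count(m)
-- ===== Notes on version B (the rewrite author's own statement) =====
-- stated objective: simpler
-- what changed: Replaces A's single fused pass maintaining a running max plus a reset-on-new-max counter with three plain passes: build the list of sides, take its max, count occurrences of the max.
-- intended difference: When every rectangle's shorter side is negative, A's 0-initialised running max never updates and A returns 0, while B returns the count of the true (negative) maximum side, which is the intended 'count rectangles attaining the largest square side' answer. — e.g. on countGoodRectangles([[-1, -1]]): A returns 0, B returns 1
import Mathlib
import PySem

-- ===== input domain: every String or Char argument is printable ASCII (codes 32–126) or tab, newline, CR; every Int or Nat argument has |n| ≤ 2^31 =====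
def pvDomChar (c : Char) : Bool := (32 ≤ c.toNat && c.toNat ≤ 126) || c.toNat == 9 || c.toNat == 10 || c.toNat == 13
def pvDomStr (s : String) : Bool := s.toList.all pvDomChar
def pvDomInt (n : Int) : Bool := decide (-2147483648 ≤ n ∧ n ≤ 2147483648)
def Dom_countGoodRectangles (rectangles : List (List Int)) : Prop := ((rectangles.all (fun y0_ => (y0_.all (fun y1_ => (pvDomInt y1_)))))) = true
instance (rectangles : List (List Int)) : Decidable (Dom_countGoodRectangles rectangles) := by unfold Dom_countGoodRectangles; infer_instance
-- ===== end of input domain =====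

-- B replaces A's fused running-max + reset-counter pass by three plain passes (map to sides, max, count);
-- on all-negative inputs B counts the true maximum side where A's 0-sentinel returns 0 (see D_ below).

-- ===== PORT A =====
-- loop body of A: minLen = rectangle[0]; if minLen > rectangle[1]: minLen = rectangle[1]; then update (count, maxLen)
def pvStepA (s : Int × Int) (rectangle : List Int) : Int × Int :=
  let minLen := (PySem.List.pyGet? rectangle 0).getD 0
  let minLen := if minLen > (PySem.List.pyGet? rectangle 1).getD 0
                then (PySem.List.pyGet? rectangle 1).getD 0 else minLen
  if minLen > s.2 then (1, minLen)
  else if minLen = s.2 then (s.1 + 1, s.2)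
  else s

def countGoodRectangles (rectangles : List (List Int)) : Int :=
  (rectangles.foldl pvStepA ((0 : Int), (0 : Int))).1

-- ===== PORT B =====
-- min(r[0], r[1])
def pvSide (r : List Int) : Int :=
  min ((PySem.List.pyGet? r 0).getD 0) ((PySem.List.pyGet? r 1).getD 0)

def countGoodRectangles_alt (rectangles : List (List Int)) : Int :=
  let sides := rectangles.map pvSide
  if sides = [] then 0
  else
    match PySem.List.max? sides (fun x => x) with
    | some m => (sides.count m : Int)
    | none => 0

-- ===== PRECONDITION & SPEC =====
-- Pre_ excludes exactly the inputs on which A raises IndexError: a rectangle with fewer than 2 entries.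
def Pre_countGoodRectangles (rectangles : List (List Int)) : Prop :=
  ∀ r ∈ rectangles, 2 ≤ r.length
instance (rectangles : List (List Int)) : Decidable (Pre_countGoodRectangles rectangles) := by
  unfold Pre_countGoodRectangles; infer_instance

def pvWitness_countGoodRectangles : List (List Int) := [[1, 2]]

-- When every rectangle's shorter side is negative, A's 0-initialised running max never updates and A
-- returns 0, while B returns the count of the true (negative) maximum side, the intended answer.
def D_countGoodRectangles (rectangles : List (List Int)) : Prop :=
  rectangles ≠ [] ∧ ∀ r ∈ rectangles, min (r.getD 0 0) (r.getD 1 0) < 0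
instance (rectangles : List (List Int)) : Decidable (D_countGoodRectangles rectangles) := by
  unfold D_countGoodRectangles; infer_instance

def Spec_countGoodRectangles (rectangles : List (List Int)) (out : Int) : Prop :=
  ¬ D_countGoodRectangles rectangles → out = countGoodRectangles_alt rectangles
instance (rectangles : List (List Int)) (out : Int) : Decidable (Spec_countGoodRectangles rectangles out) := by
  unfold Spec_countGoodRectangles; infer_instance

def pvDiffWitness_countGoodRectangles : List (List Int) := [[-1, -1]]
def pvDiffWitnessOut_countGoodRectangles : Int × Int := (0, 1)

-- ===== CLAIM (what is proved, stated in full; the proofs are below) =====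
def Claim_unchanged_countGoodRectangles : Prop := ∀ (rectangles : List (List Int)), Dom_countGoodRectangles rectangles → Pre_countGoodRectangles rectangles → Spec_countGoodRectangles rectangles (countGoodRectangles rectangles)
def Claim_changed_countGoodRectangles : Prop := Dom_countGoodRectangles (pvDiffWitness_countGoodRectangles) ∧ Pre_countGoodRectangles (pvDiffWitness_countGoodRectangles) ∧ D_countGoodRectangles (pvDiffWitness_countGoodRectangles) ∧ countGoodRectangles (pvDiffWitness_countGoodRectangles) = pvDiffWitnessOut_countGoodRectangles.1 ∧ countGoodRectangles_alt (pvDiffWitness_countGoodRectangles) = pvDiffWitnessOut_countGoodRectangles.2 ∧ pvDiffWitnessOut_countGoodRectangles.1 ≠ pvDiffWitnessOut_countGoodRectangles.2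
def Claim_exact_countGoodRectangles : Prop := ∀ (rectangles : List (List Int)), Dom_countGoodRectangles rectangles → Pre_countGoodRectangles rectangles → D_countGoodRectangles rectangles → countGoodRectangles rectangles ≠ countGoodRectangles_alt rectangles

-- ===== LEMMAS AND PROOFS =====

-- foldl max distributes over a max in the seed
lemma pv_foldl_max_assoc (t : List Int) : ∀ (a b : Int), t.foldl max (max a b) = max a (t.foldl max b) := by
  induction t with
  | nil => intro a b; simp [List.foldl]
  | cons x t ih =>
    intro a b
    simp only [List.foldl]
    rw [max_assoc, ih]

lemma pv_le_foldl_max (t : List Int) : ∀ (m : Int), m ≤ t.foldl max m := by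
  induction t with
  | nil => intro m; simp [List.foldl]
  | cons x t ih =>
    intro m
    simp only [List.foldl]
    exact le_trans (le_max_left m x) (ih _)

-- A's loop body in terms of pvSide
lemma pvStepA_eq (s : Int × Int) (r : List Int) :
    pvStepA s r = if pvSide r > s.2 then (1, pvSide r)
      else if pvSide r = s.2 then (s.1 + 1, s.2) else s := by
  simp only [pvStepA, pvSide, min_def]
  split_ifs <;> simp_all <;> omega

-- characterisation of A's fold
lemma pvFoldA (l : List (List Int)) : ∀ (c m : Int),
    l.foldl pvStepA (c, m) =
      (((l.map pvSide).count ((l.map pvSide).foldl max m) : Int) +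
        (if (l.map pvSide).foldl max m = m then c else 0),
       (l.map pvSide).foldl max m) := by
  induction l with
  | nil => intro c m; simp [List.foldl]
  | cons a l ih =>
    intro c m
    simp only [List.foldl, List.map_cons, pvStepA_eq]
    by_cases h1 : pvSide a > m
    · simp only [if_pos h1]
      rw [ih 1 (pvSide a)]
      have hmax : max m (pvSide a) = pvSide a := by omega
      have hne : (l.map pvSide).foldl max (pvSide a) ≠ m := by
        have := pv_le_foldl_max (l.map pvSide) (pvSide a); omega
      simp only [hmax, Prod.mk.injEq, and_true]
      rw [List.count_cons]
      simp only [beq_iff_eq]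
      split_ifs <;> push_cast <;> omega
    · simp only [if_neg h1]
      have hmax : max m (pvSide a) = m := by omega
      by_cases h2 : pvSide a = m
      · simp only [if_pos h2]
        rw [ih (c + 1) m]
        simp only [hmax, Prod.mk.injEq, and_true]
        rw [List.count_cons]
        simp only [beq_iff_eq]
        split_ifs <;> push_cast <;> omega
      · simp only [if_neg h2]
        rw [ih c m]
        simp only [hmax, Prod.mk.injEq, and_true]
        rw [List.count_cons]
        have hle := pv_le_foldl_max (l.map pvSide) m
        simp only [beq_iff_eq]
        split_ifs <;> push_cast <;> omega

lemma pvA_eq_count (l : List (List Int)) :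
    countGoodRectangles l = ((l.map pvSide).count ((l.map pvSide).foldl max 0) : Int) := by
  unfold countGoodRectangles
  rw [pvFoldA l 0 0]
  simp

lemma pvSide_eq_getD (r : List Int) (h : 2 ≤ r.length) :
    pvSide r = min (r.getD 0 0) (r.getD 1 0) := by
  match r, h with
  | a :: b :: t, _ =>
    have h0 : PySem.List.pyGet? (a :: b :: t) 0 = some a := by
      simp [PySem.List.pyGet?_zero_cons]
    simp [pvSide, h0]

-- every member of a list is below the running max
lemma pv_mem_le_foldl_max (s : List Int) : ∀ (x b : Int), x ∈ s → x ≤ s.foldl max b := by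
  induction s with
  | nil => intro x b hx; cases hx
  | cons y s ih =>
    intro x b hx
    rcases List.mem_cons.mp hx with h | h
    · subst h
      exact le_trans (le_max_right b x) (pv_le_foldl_max _ _)
    · exact ih x _ h

-- ===== VERDICT (by name: the statement is the Claim_ definition above) =====
theorem countGoodRectangles_spec : Claim_unchanged_countGoodRectangles := by
  intro l _ hpre hnd
  rw [pvA_eq_count]
  unfold countGoodRectangles_alt
  match hl : l with
  | [] => simp
  | a :: t =>
    simp only [List.map, reduceCtorEq, not_false_eq_true, if_neg]
    rw [PySem.List.max?_id_cons]
    -- the maximum side M is ≥ 0 since some rectangle has a non-negative min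
    have hex : ∃ r ∈ a :: t, 0 ≤ min (r.getD 0 0) (r.getD 1 0) := by
      by_contra hc
      rw [not_exists] at hc
      simp only [not_and, not_le] at hc
      exact hnd ⟨by simp, fun r hr => by have := hc r hr; omega⟩
    obtain ⟨r, hr, hge⟩ := hex
    have hside : 0 ≤ pvSide r := by rw [pvSide_eq_getD r (hpre r hr)]; exact hge
    have hmem : pvSide r ∈ pvSide a :: t.map pvSide := by
      rcases List.mem_cons.mp hr with h | h
      · simp [h]
      · exact List.mem_cons_of_mem _ (List.mem_map_of_mem h)
    have hMge : 0 ≤ (t.map pvSide).foldl max (pvSide a) := by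
      rcases List.mem_cons.mp hmem with h | h
      · calc (0:Int) ≤ pvSide r := hside
          _ = pvSide a := h
          _ ≤ _ := pv_le_foldl_max _ _
      · exact le_trans hside (pv_mem_le_foldl_max _ _ _ h)
    have hfold : (pvSide a :: t.map pvSide).foldl max 0 = (t.map pvSide).foldl max (pvSide a) := by
      have : (pvSide a :: t.map pvSide).foldl max 0 = (t.map pvSide).foldl max (max 0 (pvSide a)) := by
        simp [List.foldl]
      rw [this, pv_foldl_max_assoc]
      omega
    simp [hfold]
theorem countGoodRectangles_changed : Claim_changed_countGoodRectangles := by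
  unfold Claim_changed_countGoodRectangles; decide
theorem countGoodRectangles_tight : Claim_exact_countGoodRectangles := by
  intro l _ hpre hd
  obtain ⟨hne, hneg⟩ := hd
  match hl : l, hne with
  | a :: t, _ =>
    have hnegside : ∀ r ∈ a :: t, pvSide r < 0 := by
      intro r hr
      rw [pvSide_eq_getD r (hpre r hr)]
      exact hneg r hr
    -- A returns 0: the running max stays 0, and 0 occurs nowhere among the negative sides
    have hA : countGoodRectangles (a :: t) = 0 := by
      rw [pvA_eq_count]
      have hM : 0 ≤ ((a :: t).map pvSide).foldl max 0 := pv_le_foldl_max _ _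
      have hc : ((a :: t).map pvSide).count (((a :: t).map pvSide).foldl max 0) = 0 := by
        rw [List.count_eq_zero]
        intro hmem
        obtain ⟨r, hr, hrs⟩ := List.mem_map.mp hmem
        have := hnegside r hr
        omega
      rw [hc]
      rfl
    -- B returns a positive count: the maximum is a member of the sides list
    have hB : 0 < countGoodRectangles_alt (a :: t) := by
      unfold countGoodRectangles_alt
      simp only [List.map, reduceCtorEq, not_false_eq_true, if_neg]
      rw [PySem.List.max?_id_cons]
      have hmem : (t.map pvSide).foldl max (pvSide a) ∈ pvSide a :: t.map pvSide := by
        have := PySem.List.max?_mem (xs := pvSide a :: t.map pvSide) (key := fun x => x)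
          (m := (t.map pvSide).foldl max (pvSide a)) (by rw [PySem.List.max?_id_cons])
        exact this
      have := List.count_pos_iff.mpr hmem
      show (0 : Int) < (((pvSide a :: List.map pvSide t).count
        (List.foldl max (pvSide a) (List.map pvSide t)) : Nat) : Int)
      exact_mod_cast this
    rw [hA]
    omega
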